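-- pv_equiv track=rewrite | github.com/JIANGVUX/format_file_word | formatter.py | _split_template
-- ===== SOURCE A (Python) =====
-- from typing import Optional, Dict, Any, List, Tuple
--
-- def _split_template(template: str) -> List[str]:
--     tokens = []
--     i = 0
--     while i < len(template):
--         if template.startswith("{PAGE}", i):
--             tokens.append("{PAGE}")
--             i += len("{PAGE}")
--         elif template.startswith("{NUMPAGES}", i):
--             tokens.append("{NUMPAGES}")
--             i += len("{NUMPAGES}")
--         else:
--             j = i
--             while j < len(template) and not template.startswith("{PAGE}", j) and not template.startswith("{NUMPAGES}", j):
--                 j += 1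
--             tokens.append(template[i:j])
--             i = j
--     return tokens
-- ===== SOURCE B (Python) =====
-- import re
-- from typing import List
--
-- def _split_template(template: str) -> List[str]:
--     # split keeping the two markers (capturing group), drop empty parts
--     return [t for t in re.split(r"(\{PAGE\}|\{NUMPAGES\})", template) if t]
-- ===== Notes on version B (the rewrite author's own statement) =====
-- stated objective: idiomatic
-- what changed: Replaced the hand-written index-scanning while loops with a single re.split on the two markers (capturing group keeps them) followed by filtering out the empty strings re.split inserts at boundaries and between adjacent markers.
import Mathlib
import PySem

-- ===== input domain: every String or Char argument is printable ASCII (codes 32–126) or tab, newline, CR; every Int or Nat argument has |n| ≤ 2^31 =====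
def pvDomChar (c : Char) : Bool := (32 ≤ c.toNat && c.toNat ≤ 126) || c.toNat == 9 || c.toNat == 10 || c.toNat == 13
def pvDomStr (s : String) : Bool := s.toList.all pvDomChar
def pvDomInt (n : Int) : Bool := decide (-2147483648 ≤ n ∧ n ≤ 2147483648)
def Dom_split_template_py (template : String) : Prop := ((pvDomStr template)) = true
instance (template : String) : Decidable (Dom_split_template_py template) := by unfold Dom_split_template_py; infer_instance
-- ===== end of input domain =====

-- B replaces A's explicit index-scanning loop by a split-keeping-delimiters pass plus a
-- filter of the empty parts (re.split with a capturing group in Python); same output, simpler code.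

-- ===== PORT A =====
-- template.startswith("{PAGE}", i) / ("{NUMPAGES}", i), checked on the remaining suffix
def pvPage (l : List Char) : Bool := "{PAGE}".toList.isPrefixOf l
def pvNum (l : List Char) : Bool := "{NUMPAGES}".toList.isPrefixOf l

-- inner while loop of A: advance j collecting chars until a marker starts (or end); returns (chunk, rest)
def pvInnerA : List Char → List Char → List Char × List Char
  | [], acc => (acc.reverse, [])
  | c :: rest, acc =>
      if pvPage (c :: rest) || pvNum (c :: rest) then (acc.reverse, c :: rest)
      else pvInnerA rest (c :: acc)

theorem pvInnerA_len : ∀ (l acc : List Char), (pvInnerA l acc).2.length ≤ l.length := by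
  intro l
  induction l with
  | nil => intro acc; simp [pvInnerA]
  | cons c rest ih =>
      intro acc
      simp only [pvInnerA]
      split
      · simp
      · exact Nat.le_trans (ih (c :: acc)) (Nat.le_succ _)

-- outer while loop of A
def pvOuterA : List Char → List String
  | [] => []
  | c :: rest =>
      if pvPage (c :: rest) then "{PAGE}" :: pvOuterA ((c :: rest).drop 6)
      else if pvNum (c :: rest) then "{NUMPAGES}" :: pvOuterA ((c :: rest).drop 10)
      else
        let p := pvInnerA rest [c]
        String.ofList p.1 :: pvOuterA p.2
  termination_by l => l.length
  decreasing_by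
    · simp
    · simp
    · exact Nat.lt_succ_of_le (pvInnerA_len rest [c])

def split_template_py (template : String) : List String := pvOuterA template.toList

-- ===== PORT B =====
-- hand-written port of re.split(r"(\{PAGE\}|\{NUMPAGES\})", template): exact for this pattern —
-- it emits the (possibly empty) text before each marker, the marker itself, and the trailing text.
def pvSplitKeep : List Char → List Char → List String
  | [], acc => [String.ofList acc.reverse]
  | c :: rest, acc =>
      if pvPage (c :: rest) then
        String.ofList acc.reverse :: "{PAGE}" :: pvSplitKeep ((c :: rest).drop 6) []
      else if pvNum (c :: rest) then
        String.ofList acc.reverse :: "{NUMPAGES}" :: pvSplitKeep ((c :: rest).drop 10) []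
      else pvSplitKeep rest (c :: acc)
  termination_by l => l.length
  decreasing_by
    · simp
    · simp
    · simp

-- [t for t in re.split(...) if t]
def split_template_py_alt (template : String) : List String :=
  (pvSplitKeep template.toList []).filter (fun t => t ≠ "")

-- ===== PRECONDITION & SPEC =====
def Spec_split_template_py (template : String) (out : List String) : Prop := out = split_template_py_alt template
instance (template : String) (out : List String) : Decidable (Spec_split_template_py template out) := by unfold Spec_split_template_py; infer_instance

-- ===== CLAIM (what is proved, stated in full; the proofs are below) =====
def Claim_equal_split_template_py : Prop := ∀ (template : String), Dom_split_template_py template → Spec_split_template_py template (split_template_py template)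

-- ===== LEMMAS AND PROOFS =====

theorem pvFilter_empty_cons (xs : List String) :
    ((""::xs).filter (fun t => t ≠ "")) = xs.filter (fun t => t ≠ "") := by simp

theorem pvFilter_cons {s : String} (h : s ≠ "") (xs : List String) :
    ((s::xs).filter (fun t => t ≠ "")) = s :: xs.filter (fun t => t ≠ "") := by simp [h]

-- after pvInnerA stops, pvSplitKeep emits exactly the accumulated chunk and continues at the rest
theorem pvSplitKeep_inner : ∀ (l acc : List Char),
    pvSplitKeep l acc =
      String.ofList (pvInnerA l acc).1 ::
        (match (pvInnerA l acc).2 with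
          | [] => []
          | c :: rest =>
              if pvPage (c :: rest) then "{PAGE}" :: pvSplitKeep ((c :: rest).drop 6) []
              else "{NUMPAGES}" :: pvSplitKeep ((c :: rest).drop 10) []) := by
  intro l
  induction l with
  | nil => intro acc; simp [pvSplitKeep, pvInnerA]
  | cons c rest ih =>
      intro acc
      by_cases hp : pvPage (c :: rest) = true
      · simp [pvSplitKeep, pvInnerA, hp]
      · by_cases hn : pvNum (c :: rest) = true
        · simp [pvSplitKeep, pvInnerA, hp, hn]
        · simp only [pvSplitKeep, pvInnerA, hp, hn, Bool.or_false, if_neg, Bool.false_eq_true,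
            not_false_eq_true]
          exact ih (c :: acc)

theorem pvMk_ne_empty {l : List Char} (h : l ≠ []) : String.ofList l ≠ "" := by
  intro he
  exact h (by simpa using congrArg String.toList he)

theorem pvInnerA_fst (c : Char) (rest acc : List Char) (hp : ¬ pvPage (c :: rest) = true)
    (hn : ¬ pvNum (c :: rest) = true) :
    ∃ t, (pvInnerA rest (c :: acc)).1 = acc.reverse ++ c :: t := by
  induction rest generalizing c acc with
  | nil => exact ⟨[], by simp [pvInnerA]⟩
  | cons d rest2 ih =>
      by_cases hp2 : pvPage (d :: rest2) = true
      · exact ⟨[], by simp [pvInnerA, hp2]⟩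
      · by_cases hn2 : pvNum (d :: rest2) = true
        · exact ⟨[], by simp [pvInnerA, hp2, hn2]⟩
        · obtain ⟨t, ht⟩ := ih d (c :: acc) hp2 hn2
          refine ⟨d :: t, ?_⟩
          simp only [pvInnerA, hp2, hn2, Bool.or_false, Bool.false_eq_true, not_false_eq_true,
            if_neg]
          simpa using ht

-- pvInnerA always stops at the end of the input or at a marker
theorem pvInnerA_stop : ∀ (l acc : List Char), (pvInnerA l acc).2 = [] ∨
    pvPage (pvInnerA l acc).2 = true ∨ pvNum (pvInnerA l acc).2 = true := by
  intro l
  induction l with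
  | nil => intro acc; simp [pvInnerA]
  | cons e l2 ih2 =>
      intro acc
      by_cases he : (pvPage (e :: l2) || pvNum (e :: l2)) = true
      · simp only [pvInnerA, he, if_pos]
        rcases Bool.or_eq_true_iff.mp he with h | h
        · exact Or.inr (Or.inl h)
        · exact Or.inr (Or.inr h)
      · simp only [pvInnerA, he, if_neg, Bool.false_eq_true, not_false_eq_true]
        exact ih2 (e :: acc)

theorem pvMain : ∀ (n : ℕ) (l : List Char), l.length ≤ n →
    (pvSplitKeep l []).filter (fun t => t ≠ "") = pvOuterA l := by
  intro n
  induction n with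
  | zero =>
      intro l hl
      have : l = [] := List.eq_nil_of_length_eq_zero (Nat.le_zero.mp hl)
      subst this
      rw [pvSplitKeep, pvOuterA, show String.ofList (([] : List Char)).reverse = "" from rfl,
        pvFilter_empty_cons]
      rfl
  | succ n ih =>
      intro l hl
      match l with
      | [] =>
        rw [pvSplitKeep, pvOuterA, show String.ofList (([] : List Char)).reverse = "" from rfl,
          pvFilter_empty_cons]
        rfl
      | c :: rest =>
        by_cases hp : pvPage (c :: rest) = true
        · rw [pvOuterA]
          simp only [hp, if_pos]
          rw [pvSplitKeep]
          simp only [hp, if_pos]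
          rw [show String.ofList (([] : List Char)).reverse = "" from rfl]
          rw [pvFilter_empty_cons, pvFilter_cons (by decide)]
          exact congrArg _ (ih _ (by simp at hl ⊢; omega))
        · by_cases hn : pvNum (c :: rest) = true
          · rw [pvOuterA]
            simp only [hp, hn, if_pos, Bool.false_eq_true, not_false_eq_true, if_neg]
            rw [pvSplitKeep]
            simp only [hp, hn, Bool.false_eq_true, not_false_eq_true, if_neg, if_pos]
            rw [show String.ofList (([] : List Char)).reverse = "" from rfl]
            rw [pvFilter_empty_cons, pvFilter_cons (by decide)]
            exact congrArg _ (ih _ (by simp at hl ⊢; omega))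
          · rw [pvOuterA]
            simp only [hp, hn, Bool.false_eq_true, not_false_eq_true, if_neg]
            rw [pvSplitKeep]
            simp only [hp, hn, Bool.false_eq_true, not_false_eq_true, if_neg]
            rw [pvSplitKeep_inner]
            obtain ⟨t, ht⟩ := pvInnerA_fst c rest [] hp hn
            have hchunk : (pvInnerA rest [c]).1 ≠ [] := by
              rw [ht]; simp
            have hmkne : String.ofList (pvInnerA rest [c]).1 ≠ "" := pvMk_ne_empty hchunk
            rw [pvFilter_cons hmkne]
            congr 1
            have hlen := pvInnerA_len rest [c]
            match hr : (pvInnerA rest [c]).2 with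
            | [] => rw [pvOuterA]; rfl
            | d :: rest2 =>
              have hlen2 : (d :: rest2).length ≤ rest.length := by rw [← hr]; exact hlen
              by_cases hp2 : pvPage (d :: rest2) = true
              · simp only [hp2, if_pos]
                rw [pvOuterA]
                simp only [hp2, if_pos]
                rw [pvFilter_cons (by decide)]
                congr 1
                refine ih _ ?_
                simp at hl hlen2 ⊢; omega
              · have hn2 : pvNum (d :: rest2) = true := by
                  rcases pvInnerA_stop rest [c] with h | h | h
                  · rw [hr] at h; simp at h
                  · rw [hr] at h; exact absurd h hp2
                  · rw [hr] at h; exact h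
                simp only [hp2, Bool.false_eq_true, not_false_eq_true, if_neg]
                rw [pvOuterA]
                simp only [hp2, hn2, Bool.false_eq_true, not_false_eq_true, if_neg, if_pos]
                rw [pvFilter_cons (by decide)]
                congr 1
                refine ih _ ?_
                simp at hl hlen2 ⊢; omega

-- ===== VERDICT (by name: the statement is the Claim_ definition above) =====
theorem split_template_py_spec : Claim_equal_split_template_py := by
  intro template _
  unfold Spec_split_template_py split_template_py split_template_py_alt
  exact (pvMain template.toList.length template.toList le_rfl).symm
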